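-- pv_equiv track=rewrite | github.com/gilcu2/python_data_science | src/wayve/practise.py | getDistanceMetrics
-- ===== SOURCE A (Python) =====
-- def getDistanceMetrics(arr):
--     result= [0] * len(arr)
--
--     for i in range(len(arr)-1):
--         for j in range(i+1,len(arr)):
--             if arr[i]==arr[j]:
--                 result[i]+=j-i
--                 result[j]+=j-i
--     return result
-- ===== SOURCE B (Python) =====
-- def _distPass(items):
--     # items: iterable of (index, value); for each pair, emit
--     # sum over previously seen equal-valued pairs of (index - seen_index),
--     # computed O(1) per step from a running count and a running index-sum per value.
--     out = []
--     cnt = {}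
--     tot = {}
--     for i, v in items:
--         c = cnt.get(v, 0)
--         t = tot.get(v, 0)
--         out.append(c * i - t)
--         cnt[v] = c + 1
--         tot[v] = t + i
--     return out
--
--
-- def getDistanceMetrics(arr):
--     pairs = list(enumerate(arr))
--     left = _distPass(pairs)            # left[i]  = sum_{j<i, arr[j]==arr[i]} (i-j)
--     right = _distPass(reversed(pairs)) # reversed: sum_{j>i, arr[j]==arr[i]} (i-j)  (<= 0)
--     right.reverse()
--     return [a - b for a, b in zip(left, right)]
-- ===== Notes on version B (the rewrite author's own statement) =====
-- stated objective: faster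
-- what changed: Replaces the O(n^2) all-pairs double loop by two O(n) sweeps that keep, per value, a running count and running index-sum in dictionaries, giving each index's distance sum in O(1) from left and right.
import Mathlib
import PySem

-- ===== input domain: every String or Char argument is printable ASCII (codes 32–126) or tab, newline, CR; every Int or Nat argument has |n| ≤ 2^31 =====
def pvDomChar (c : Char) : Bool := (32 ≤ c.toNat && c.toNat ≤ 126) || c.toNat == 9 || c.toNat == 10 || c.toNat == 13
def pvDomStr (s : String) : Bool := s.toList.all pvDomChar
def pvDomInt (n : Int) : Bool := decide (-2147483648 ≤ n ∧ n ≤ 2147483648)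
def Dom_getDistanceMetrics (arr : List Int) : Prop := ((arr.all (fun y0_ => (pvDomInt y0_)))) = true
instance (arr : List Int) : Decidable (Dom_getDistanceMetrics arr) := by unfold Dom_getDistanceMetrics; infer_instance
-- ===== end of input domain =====

-- B replaces A's all-pairs double loop by two linear sweeps with per-value running count/index-sum dictionaries (objective: faster).

-- ===== PORT A =====
-- res[i] += d for an index 0 ≤ i < len res (A only executes it on such i, where toNat-modify is exact)
def pvAddAt (res : List Int) (i : Int) (d : Int) : List Int :=
  res.modify i.toNat (· + d)

-- body of A's inner j-loop
def pvInnerStep (arr : List Int) (i : Int) (res : List Int) (j : Int) : List Int :=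
  if PySem.List.pyGet? arr i = PySem.List.pyGet? arr j then
    pvAddAt (pvAddAt res i (j - i)) j (j - i)
  else res

def getDistanceMetrics (arr : List Int) : List Int :=
  (PySem.List.pyRange 0 (PySem.List.len arr - 1) 1).foldl (fun res i =>
    (PySem.List.pyRange (i + 1) (PySem.List.len arr) 1).foldl (pvInnerStep arr i) res)
    (List.replicate arr.length 0)

-- ===== PORT B =====
-- body of B's sweep: out.append(cnt.get(v,0)*i - tot.get(v,0)); cnt[v] += 1; tot[v] += i
def pvDistStep (st : List Int × PySem.Dict Int Int × PySem.Dict Int Int) (p : Int × Int) :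
    List Int × PySem.Dict Int Int × PySem.Dict Int Int :=
  let c := st.2.1.getD p.2 0
  let t := st.2.2.getD p.2 0
  (st.1 ++ [c * p.1 - t], st.2.1.insert p.2 (c + 1), st.2.2.insert p.2 (t + p.1))

def pvDistPass (items : List (Int × Int)) : List Int :=
  (items.foldl pvDistStep ([], PySem.Dict.empty, PySem.Dict.empty)).1

def getDistanceMetrics_alt (arr : List Int) : List Int :=
  let pairs := PySem.List.enumerate arr
  let left := pvDistPass pairs
  let right := (pvDistPass pairs.reverse).reverse
  (left.zip right).map (fun q => q.1 - q.2)

-- ===== PRECONDITION & SPEC =====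
def Spec_getDistanceMetrics (arr : List Int) (out : List Int) : Prop := out = getDistanceMetrics_alt arr
instance (arr : List Int) (out : List Int) : Decidable (Spec_getDistanceMetrics arr out) := by unfold Spec_getDistanceMetrics; infer_instance

-- ===== CLAIM (what is proved, stated in full; the proofs are below) =====
def Claim_equal_getDistanceMetrics : Prop := ∀ (arr : List Int), Dom_getDistanceMetrics arr → Spec_getDistanceMetrics arr (getDistanceMetrics arr)

-- ===== LEMMAS AND PROOFS =====

-- the canonical per-index distance sums both programs compute
def pvVal (arr : List Int) (j : Int) : Int := PySem.List.pyGetD arr j 0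

def pvSumFrom (arr : List Int) (i a : Int) : Int :=
  ((PySem.List.pyRange a (PySem.List.len arr) 1).map
    (fun j => if pvVal arr j = pvVal arr i then j - i else 0)).sum

def pvSumTo (arr : List Int) (b k : Int) : Int :=
  ((PySem.List.pyRange b k 1).map
    (fun j => if pvVal arr j = pvVal arr k then k - j else 0)).sum

-- ----- A side -----

theorem pvAddAt_length (r : List Int) (i d : Int) : (pvAddAt r i d).length = r.length := by
  unfold pvAddAt
  exact List.length_modify _ r i.toNat

theorem pvGetElem_congr {α : Type} (l : List α) {i1 i2 : Nat} (h : i1 = i2)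
    (h1 : i1 < l.length) (h2 : i2 < l.length) : l[i1] = l[i2] := by
  subst h; rfl

theorem pvAddAt_getD (r : List Int) (i d : Int) (hi : 0 ≤ i) (k : Nat) (hk : k < r.length) :
    (pvAddAt r i d).getD k 0 = if (k : Int) = i then r.getD k 0 + d else r.getD k 0 := by
  unfold pvAddAt
  have hk' : k < (r.modify i.toNat (· + d)).length := by
    simpa [List.length_modify] using hk
  rw [List.getD_eq_getElem _ _ hk', List.getD_eq_getElem _ _ hk]
  have h1 : (r.modify i.toNat (· + d))[k]? = (fun a => if i.toNat = k then a + d else a) <$> r[k]? :=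
    List.getElem?_modify _ _ _ _
  rw [List.getElem?_eq_getElem hk', List.getElem?_eq_getElem hk] at h1
  have h2 : (r.modify i.toNat (· + d))[k]'hk' = if i.toNat = k then r[k]'hk + d else r[k]'hk :=
    Option.some_injective _ h1
  by_cases hc : (k : Int) = i
  · have hnat : i.toNat = k := by omega
    rw [if_pos hc, h2, if_pos hnat]
  · have hnat : ¬ i.toNat = k := by omega
    rw [if_neg hc, h2, if_neg hnat]

theorem pvFoldl_length {β : Type} (f : List Int → β → List Int)
    (hf : ∀ r x, (f r x).length = r.length) :
    ∀ (l : List β) (r : List Int), (l.foldl f r).length = r.length := by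
  intro l
  induction l with
  | nil => intro r; rfl
  | cons x t ih => intro r; rw [List.foldl_cons, ih, hf]

theorem pvInnerStep_length (arr : List Int) (i : Int) (r : List Int) (j : Int) :
    (pvInnerStep arr i r j).length = r.length := by
  unfold pvInnerStep
  split
  · rw [pvAddAt_length, pvAddAt_length]
  · rfl

theorem pvGetEq_iff (arr : List Int) (i j : Int) (hi0 : 0 ≤ i) (hi : i < (arr.length : Int))
    (hj0 : 0 ≤ j) (hj : j < (arr.length : Int)) :
    (PySem.List.pyGet? arr i = PySem.List.pyGet? arr j) ↔ pvVal arr i = pvVal arr j := by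
  rw [PySem.List.pyGet?_eq_some_getElem arr hi0 hi, PySem.List.pyGet?_eq_some_getElem arr hj0 hj,
      pvVal, pvVal, PySem.List.pyGetD_eq_getElem arr 0 hi0 hi, PySem.List.pyGetD_eq_getElem arr 0 hj0 hj]
  simp

theorem pvInner_spec (arr : List Int) (i : Int) (hi0 : 0 ≤ i) (hi : i < (arr.length : Int)) :
    ∀ (m : Nat) (a : Int), ((arr.length : Int) - a).toNat = m → i < a →
    ∀ (r : List Int), r.length = arr.length → ∀ (k : Nat), k < arr.length →
    ((PySem.List.pyRange a (PySem.List.len arr) 1).foldl (pvInnerStep arr i) r).getD k 0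
      = r.getD k 0 + (if (k : Int) = i then pvSumFrom arr i a
          else if a ≤ (k : Int) ∧ pvVal arr k = pvVal arr i then (k : Int) - i else 0) := by
  intro m
  induction m with
  | zero =>
    intro a hm ha r hr k hk
    have hna : (arr.length : Int) ≤ a := by omega
    have hnil : PySem.List.pyRange a (PySem.List.len arr) 1 = [] := by
      rw [PySem.List.len_eq]; exact PySem.List.pyRange_one_eq_nil hna
    rw [hnil]
    have h1 : pvSumFrom arr i a = 0 := by
      unfold pvSumFrom; rw [hnil]; rfl
    have h2 : ¬ (a ≤ (k : Int) ∧ pvVal arr k = pvVal arr i) := by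
      rintro ⟨h, _⟩; omega
    rw [List.foldl_nil, h1, if_neg h2]
    split <;> omega
  | succ m ih =>
    intro a hm ha r hr k hk
    have han : a < (arr.length : Int) := by omega
    have ha0 : 0 ≤ a := le_trans hi0 (le_of_lt ha)
    have hcons : PySem.List.pyRange a (PySem.List.len arr) 1
        = a :: PySem.List.pyRange (a + 1) (PySem.List.len arr) 1 := by
      rw [PySem.List.len_eq]; exact PySem.List.pyRange_one_cons han
    rw [hcons, List.foldl_cons]
    have hr' : (pvInnerStep arr i r a).length = arr.length := by
      rw [pvInnerStep_length, hr]
    rw [ih (a + 1) (by omega) (by omega) _ hr' k hk]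
    have hstep : (pvInnerStep arr i r a).getD k 0
        = r.getD k 0 + (if pvVal arr a = pvVal arr i then
            ((if (k : Int) = i then a - i else 0) + (if (k : Int) = a then a - i else 0)) else 0) := by
      unfold pvInnerStep
      by_cases heq : pvVal arr a = pvVal arr i
      · rw [if_pos ((pvGetEq_iff arr i a hi0 hi ha0 han).mpr heq.symm)]
        rw [pvAddAt_getD _ a _ ha0 k (by rw [pvAddAt_length, hr]; exact hk),
            pvAddAt_getD r i _ hi0 k (by rw [hr]; exact hk)]
        rw [if_pos heq]
        have hia : (k : Int) = i → (k : Int) ≠ a := by omega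
        by_cases hki : (k : Int) = i
        · rw [if_neg (hia hki), if_pos hki, if_pos hki, if_neg (hia hki)]; ring
        · rw [if_neg hki, if_neg hki]
          by_cases hka : (k : Int) = a
          · rw [if_pos hka, if_pos hka]; ring
          · rw [if_neg hka, if_neg hka]; ring
      · rw [if_neg (fun hc => heq (((pvGetEq_iff arr i a hi0 hi ha0 han).mp hc).symm)), if_neg heq]
        ring
    have hsf : pvSumFrom arr i a
        = (if pvVal arr a = pvVal arr i then a - i else 0) + pvSumFrom arr i (a + 1) := by
      unfold pvSumFrom
      rw [hcons, List.map_cons, List.sum_cons]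
    rw [hstep, hsf]
    by_cases hka : (k : Int) = a
    · rw [hka]
      split_ifs <;> omega
    · split_ifs <;> omega

theorem pvOuter_spec (arr : List Int) :
    ∀ (m : Nat) (b : Int), ((arr.length : Int) - 1 - b).toNat = m → 0 ≤ b →
    ∀ (r : List Int), r.length = arr.length → ∀ (k : Nat), k < arr.length →
    ((PySem.List.pyRange b (PySem.List.len arr - 1) 1).foldl
        (fun res i => (PySem.List.pyRange (i + 1) (PySem.List.len arr) 1).foldl (pvInnerStep arr i) res) r).getD k 0
      = r.getD k 0
        + (if b ≤ (k : Int) ∧ (k : Int) < (arr.length : Int) - 1 then pvSumFrom arr k ((k : Int) + 1) else 0)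
        + pvSumTo arr b k := by
  intro m
  induction m with
  | zero =>
    intro b hm hb r hr k hk
    have hnb : PySem.List.len arr - 1 ≤ b := by rw [PySem.List.len_eq]; omega
    rw [PySem.List.pyRange_one_eq_nil hnb, List.foldl_nil]
    have h1 : ¬ (b ≤ (k : Int) ∧ (k : Int) < (arr.length : Int) - 1) := by
      rintro ⟨h, h'⟩; omega
    have h2 : pvSumTo arr b k = 0 := by
      unfold pvSumTo
      rw [PySem.List.pyRange_one_eq_nil (by omega)]; rfl
    rw [if_neg h1, h2]; ring
  | succ m ih =>
    intro b hm hb r hr k hk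
    have hbn : b < PySem.List.len arr - 1 := by rw [PySem.List.len_eq]; omega
    rw [PySem.List.pyRange_one_cons hbn, List.foldl_cons]
    have hlen1 : ((PySem.List.pyRange (b + 1) (PySem.List.len arr) 1).foldl (pvInnerStep arr b) r).length
        = arr.length := by
      rw [pvFoldl_length _ (pvInnerStep_length arr b), hr]
    rw [ih (b + 1) (by omega) (by omega) _ hlen1 k hk]
    rw [pvInner_spec arr b hb (by omega) ((arr.length : Int) - (b + 1)).toNat (b + 1) rfl (by omega) r hr k hk]
    have hto : pvSumTo arr b k
        = (if b < (k : Int) then (if pvVal arr b = pvVal arr k then (k : Int) - b else 0) else 0)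
          + pvSumTo arr (b + 1) k := by
      by_cases hbk : b < (k : Int)
      · unfold pvSumTo
        rw [PySem.List.pyRange_one_cons hbk, List.map_cons, List.sum_cons, if_pos hbk]
      · have h0 : pvSumTo arr b k = 0 := by
          unfold pvSumTo; rw [PySem.List.pyRange_one_eq_nil (by omega)]; rfl
        have h0' : pvSumTo arr (b + 1) k = 0 := by
          unfold pvSumTo; rw [PySem.List.pyRange_one_eq_nil (by omega)]; rfl
        rw [h0, h0', if_neg hbk]; ring
    rw [hto]
    by_cases hkb : (k : Int) = b
    · rw [hkb]
      split_ifs <;> omega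
    · split_ifs <;> omega

theorem pvA_length (arr : List Int) : (getDistanceMetrics arr).length = arr.length := by
  unfold getDistanceMetrics
  rw [pvFoldl_length _ (fun r i => pvFoldl_length _ (pvInnerStep_length arr i) _ r), List.length_replicate]

theorem pvA_getD (arr : List Int) (k : Nat) (hk : k < arr.length) :
    (getDistanceMetrics arr).getD k 0 = pvSumTo arr 0 k + pvSumFrom arr k ((k : Int) + 1) := by
  unfold getDistanceMetrics
  rw [pvOuter_spec arr ((arr.length : Int) - 1 - 0).toNat 0 rfl le_rfl _ (List.length_replicate) k hk]
  rw [List.getD_replicate _ hk]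
  by_cases hc : (0 : Int) ≤ (k : Int) ∧ (k : Int) < (arr.length : Int) - 1
  · rw [if_pos hc]; ring
  · have hklast : (arr.length : Int) ≤ (k : Int) + 1 := by omega
    have h0 : pvSumFrom arr k ((k : Int) + 1) = 0 := by
      unfold pvSumFrom
      rw [PySem.List.len_eq, PySem.List.pyRange_one_eq_nil hklast]; rfl
    rw [if_neg hc, h0]; ring

-- ----- B side -----

-- the value B appends for pair p after having seen the pairs `seen`
def pvSeen (seen : List (Int × Int)) (p : Int × Int) : Int :=
  (seen.map (fun q => if q.2 = p.2 then p.1 - q.1 else 0)).sum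

def pvPassSpec : List (Int × Int) → List (Int × Int) → List Int
  | _, [] => []
  | seen, p :: rest => pvSeen seen p :: pvPassSpec (seen ++ [p]) rest

theorem pvSeen_linear (seen : List (Int × Int)) (v i : Int) :
    (seen.map (fun q => if q.2 = v then i - q.1 else 0)).sum
      = (seen.countP (fun q => q.2 == v) : Int) * i
        - (seen.map (fun q => if q.2 = v then q.1 else 0)).sum := by
  induction seen with
  | nil => simp
  | cons q t ih =>
    rw [List.map_cons, List.sum_cons, List.map_cons, List.sum_cons, List.countP_cons, ih]
    by_cases h : q.2 = v
    · have hb : (q.2 == v) = true := beq_iff_eq.mpr h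
      rw [if_pos h, if_pos h, hb, if_pos rfl]
      push_cast; ring
    · have hb : (q.2 == v) = false := by simp [h]
      rw [if_neg h, if_neg h, hb]
      simp only [Bool.false_eq_true, if_false]
      push_cast; ring

theorem pvPass_fold : ∀ (l seen out : _) (cnt tot : PySem.Dict Int Int),
    (∀ v, cnt.getD v 0 = (seen.countP (fun q => q.2 == v) : Int)) →
    (∀ v, tot.getD v 0 = (seen.map (fun q => if q.2 = v then q.1 else 0)).sum) →
    (l.foldl pvDistStep (out, cnt, tot)).1 = out ++ pvPassSpec seen l := by
  intro l
  induction l with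
  | nil => intro seen out cnt tot _ _; simp [pvPassSpec]
  | cons p rest ih =>
    intro seen out cnt tot hc ht
    rw [List.foldl_cons]
    show (rest.foldl pvDistStep
        (out ++ [cnt.getD p.2 0 * p.1 - tot.getD p.2 0],
         cnt.insert p.2 (cnt.getD p.2 0 + 1), tot.insert p.2 (tot.getD p.2 0 + p.1))).1
      = out ++ pvPassSpec seen (p :: rest)
    rw [ih (seen ++ [p]) _ _ _ ?_ ?_]
    · have hval : cnt.getD p.2 0 * p.1 - tot.getD p.2 0 = pvSeen seen p := by
        rw [hc, ht, pvSeen, pvSeen_linear]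
      rw [hval, pvPassSpec]
      simp
    · intro v
      rw [PySem.Dict.getD_insert, List.countP_append]
      by_cases h : v = p.2
      · subst h
        rw [if_pos rfl, hc]
        have h1 : List.countP (fun q => q.2 == p.2) [p] = 1 := by simp
        rw [h1]; push_cast; ring
      · rw [if_neg h, hc]
        have h1 : List.countP (fun q => q.2 == v) [p] = 0 := by
          simp only [List.countP_cons, List.countP_nil, beq_iff_eq, Nat.zero_add]
          exact if_neg (fun hq => h hq.symm)
        rw [h1]; push_cast; ring
    · intro v
      rw [PySem.Dict.getD_insert, List.map_append, List.sum_append]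
      by_cases h : v = p.2
      · subst h
        rw [if_pos rfl, ht]
        have h1 : ([p].map (fun q => if q.2 = p.2 then q.1 else 0)).sum = p.1 := by simp
        rw [h1]
      · rw [if_neg h, ht]
        have h1 : ([p].map (fun q => if q.2 = v then q.1 else 0)).sum = 0 := by
          simp only [List.map_cons, List.map_nil, List.sum_cons, List.sum_nil, add_zero]
          exact if_neg (fun hq => h hq.symm)
        rw [h1]; ring

theorem pvDistPass_eq (l : List (Int × Int)) : pvDistPass l = pvPassSpec [] l := by
  unfold pvDistPass
  rw [pvPass_fold l [] [] _ _ (by intro v; simp [PySem.Dict.getD_empty])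
      (by intro v; simp [PySem.Dict.getD_empty]), List.nil_append]

theorem pvPassSpec_length : ∀ (l seen : List (Int × Int)), (pvPassSpec seen l).length = l.length := by
  intro l
  induction l with
  | nil => intro seen; rfl
  | cons p rest ih => intro seen; rw [pvPassSpec, List.length_cons, ih, List.length_cons]

theorem pvDistPass_length (l : List (Int × Int)) : (pvDistPass l).length = l.length := by
  rw [pvDistPass_eq, pvPassSpec_length]

theorem pvPassSpec_getD : ∀ (l seen : List (Int × Int)) (k : Nat), k < l.length →
    (pvPassSpec seen l).getD k 0 = pvSeen (seen ++ l.take k) (l.getD k (0, 0)) := by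
  intro l
  induction l with
  | nil => intro seen k hk; simp at hk
  | cons p rest ih =>
    intro seen k hk
    cases k with
    | zero => simp [pvPassSpec]
    | succ k =>
      rw [pvPassSpec, List.getD_cons_succ, List.getD_cons_succ,
          ih (seen ++ [p]) k (by simpa using hk), List.take_succ_cons, List.append_assoc,
          List.singleton_append]

theorem pvEnumerate_take {α : Type} : ∀ (xs : List α) (s : Int) (k : Nat),
    (PySem.List.enumerate xs s).take k = PySem.List.enumerate (xs.take k) s := by
  intro xs
  induction xs with
  | nil => intro s k; simp [PySem.List.enumerate_nil]
  | cons x t ih =>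
    intro s k
    cases k with
    | zero => simp [PySem.List.enumerate_nil]
    | succ k => rw [PySem.List.enumerate_cons, List.take_succ_cons, List.take_succ_cons,
        PySem.List.enumerate_cons, ih]

theorem pvEnumerate_drop {α : Type} : ∀ (xs : List α) (s : Int) (k : Nat),
    (PySem.List.enumerate xs s).drop k = PySem.List.enumerate (xs.drop k) (s + (k : Int)) := by
  intro xs
  induction xs with
  | nil => intro s k; simp [PySem.List.enumerate_nil]
  | cons x t ih =>
    intro s k
    cases k with
    | zero => simp
    | succ k =>
      rw [PySem.List.enumerate_cons, List.drop_succ_cons, List.drop_succ_cons, ih]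
      have : s + 1 + (k : Int) = s + ((k + 1 : Nat) : Int) := by push_cast; ring
      rw [this]

theorem pvGetD_cons_succ (x : Int) (t : List Int) (m : Int) (h0 : 0 ≤ m) (h1 : m < (t.length : Int)) :
    PySem.List.pyGetD (x :: t) (m + 1) 0 = PySem.List.pyGetD t m 0 := by
  rw [PySem.List.pyGetD_eq_getElem (x :: t) 0 (by omega) (by simp [List.length_cons]; omega),
      PySem.List.pyGetD_eq_getElem t 0 h0 h1]
  have hb1 : (m + 1).toNat < (x :: t).length := by simp [List.length_cons]; omega
  have hb2 : m.toNat + 1 < (x :: t).length := by simp [List.length_cons]; omega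
  rw [pvGetElem_congr (x :: t) (show (m + 1).toNat = m.toNat + 1 by omega) hb1 hb2,
      List.getElem_cons_succ]

theorem pvSeenSum_enum (xs : List Int) : ∀ (s v i : Int),
    ((PySem.List.enumerate xs s).map (fun q => if q.2 = v then i - q.1 else 0)).sum
      = ((PySem.List.pyRange s (s + (xs.length : Int)) 1).map
          (fun j => if PySem.List.pyGetD xs (j - s) 0 = v then i - j else 0)).sum := by
  induction xs with
  | nil =>
    intro s v i
    rw [PySem.List.enumerate_nil, PySem.List.pyRange_one_eq_nil (by simp)]
    rfl
  | cons x t ih =>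
    intro s v i
    have hbound : s + ((x :: t).length : Int) = (s + 1) + (t.length : Int) := by
      simp [List.length_cons]; ring
    rw [PySem.List.enumerate_cons, List.map_cons, List.sum_cons, hbound,
        PySem.List.pyRange_one_cons (by omega), List.map_cons, List.sum_cons]
    congr 1
    · have hss : s - s = (0 : Int) := by ring
      rw [hss, PySem.List.pyGetD_zero_cons]
    · rw [ih (s + 1) v i]
      apply congrArg List.sum
      apply List.map_congr_left
      intro j hj
      rw [PySem.List.mem_pyRange_one] at hj
      have hjs : j - s = (j - (s + 1)) + 1 := by ring
      rw [hjs, pvGetD_cons_succ x t (j - (s + 1)) (by omega) (by omega)]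

theorem pvSum_map_neg {α : Type} (l : List α) (f g : α → Int) (h : ∀ x ∈ l, f x = - g x) :
    (l.map f).sum = -((l.map g).sum) := by
  induction l with
  | nil => simp
  | cons x t ih =>
    rw [List.map_cons, List.sum_cons, List.map_cons, List.sum_cons,
        h x (List.mem_cons_self), ih (fun y hy => h y (List.mem_cons_of_mem _ hy))]
    ring

theorem pvLeft_getD (arr : List Int) (k : Nat) (hk : k < arr.length) :
    (pvDistPass (PySem.List.enumerate arr)).getD k 0 = pvSumTo arr 0 k := by
  have hlen : k < (PySem.List.enumerate arr 0).length := by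
    rw [PySem.List.length_enumerate]; exact hk
  rw [pvDistPass_eq, pvPassSpec_getD _ _ k hlen, List.nil_append,
      List.getD_eq_getElem _ _ hlen, PySem.List.getElem_enumerate, pvEnumerate_take]
  rw [pvSeen]
  simp only [zero_add]
  rw [pvSeenSum_enum (arr.take k) 0 (arr[k]) (k : Int)]
  have hlen2 : ((arr.take k).length : Int) = (k : Int) := by
    simp [List.length_take]; omega
  rw [hlen2, zero_add]
  unfold pvSumTo
  apply congrArg List.sum
  apply List.map_congr_left
  intro j hj
  rw [PySem.List.mem_pyRange_one] at hj
  have h0 : (0 : Int) ≤ j := hj.1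
  have hjk : j < (k : Int) := hj.2
  have hjt : j - 0 = j := by ring
  have h1 : PySem.List.pyGetD (arr.take k) (j - 0) 0 = pvVal arr j := by
    rw [hjt]
    unfold pvVal
    rw [PySem.List.pyGetD_eq_getElem (arr.take k) 0 h0 (by rw [hlen2]; exact hjk),
        PySem.List.pyGetD_eq_getElem arr 0 h0 (by omega)]
    exact List.getElem_take
  have h2 : pvVal arr (k : Int) = arr[k] := by
    unfold pvVal
    rw [PySem.List.pyGetD_eq_getElem arr 0 (by omega) (by omega)]
    exact pvGetElem_congr arr (by omega) (by omega) hk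
  rw [h1, h2]

theorem pvRight_getD (arr : List Int) (k : Nat) (hk : k < arr.length) :
    ((pvDistPass ((PySem.List.enumerate arr).reverse)).reverse).getD k 0
      = -(pvSumFrom arr k ((k : Int) + 1)) := by
  have hL : (pvDistPass ((PySem.List.enumerate arr).reverse)).length = arr.length := by
    rw [pvDistPass_length, List.length_reverse, PySem.List.length_enumerate]
  have hkrev : k < ((pvDistPass ((PySem.List.enumerate arr).reverse)).reverse).length := by
    rw [List.length_reverse, hL]; exact hk
  have hb0 : (pvDistPass ((PySem.List.enumerate arr).reverse)).length - 1 - k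
      < (pvDistPass ((PySem.List.enumerate arr).reverse)).length := by
    rw [hL]; omega
  rw [List.getD_eq_getElem _ _ hkrev, List.getElem_reverse,
      ← List.getD_eq_getElem _ 0 hb0]
  have hidx : (pvDistPass ((PySem.List.enumerate arr).reverse)).length - 1 - k
      = arr.length - 1 - k := by rw [hL]
  rw [hidx]
  have hrevlen : ((PySem.List.enumerate arr).reverse).length = arr.length := by
    rw [List.length_reverse, PySem.List.length_enumerate]
  rw [pvDistPass_eq, pvPassSpec_getD _ _ (arr.length - 1 - k) (by rw [hrevlen]; omega),
      List.nil_append]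
  have hm : arr.length - 1 - k < ((PySem.List.enumerate arr).reverse).length := by
    rw [hrevlen]; omega
  have hpair : ((PySem.List.enumerate arr).reverse).getD (arr.length - 1 - k) (0, 0)
      = ((k : Int), arr[k]) := by
    rw [List.getD_eq_getElem _ _ hm, List.getElem_reverse]
    have hb1 : (PySem.List.enumerate arr 0).length - 1 - (arr.length - 1 - k)
        < (PySem.List.enumerate arr 0).length := by
      rw [PySem.List.length_enumerate]; omega
    have hb2 : k < (PySem.List.enumerate arr 0).length := by
      rw [PySem.List.length_enumerate]; exact hk
    rw [pvGetElem_congr (PySem.List.enumerate arr 0)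
        (show (PySem.List.enumerate arr 0).length - 1 - (arr.length - 1 - k) = k by
          rw [PySem.List.length_enumerate]; omega) hb1 hb2,
      PySem.List.getElem_enumerate]
    simp
  rw [hpair]
  have htake : ((PySem.List.enumerate arr).reverse).take (arr.length - 1 - k)
      = ((PySem.List.enumerate arr).drop (k + 1)).reverse := by
    rw [List.take_reverse]
    have hd : (PySem.List.enumerate arr 0).length - (arr.length - 1 - k) = k + 1 := by
      rw [PySem.List.length_enumerate]; omega
    rw [hd]
  rw [htake, pvEnumerate_drop]
  have hs : (0 : Int) + ((k + 1 : Nat) : Int) = ((k : Int) + 1) := by push_cast; ring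
  rw [hs]
  rw [pvSeen]
  rw [List.map_reverse, List.sum_reverse]
  rw [pvSeenSum_enum (arr.drop (k + 1)) ((k : Int) + 1) (arr[k]) (k : Int)]
  have hb : ((k : Int) + 1) + (((arr.drop (k + 1)).length : Int)) = (arr.length : Int) := by
    rw [List.length_drop]; omega
  rw [hb]
  unfold pvSumFrom
  rw [PySem.List.len_eq]
  apply pvSum_map_neg
  intro j hj
  rw [PySem.List.mem_pyRange_one] at hj
  have h1 : PySem.List.pyGetD (arr.drop (k + 1)) (j - ((k : Int) + 1)) 0 = pvVal arr j := by
    unfold pvVal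
    rw [PySem.List.pyGetD_eq_getElem (arr.drop (k + 1)) 0 (by omega)
          (by rw [List.length_drop]; omega),
        PySem.List.pyGetD_eq_getElem arr 0 (by omega) (by omega)]
    rw [List.getElem_drop]
    exact pvGetElem_congr arr (by omega) (by omega) (by omega)
  have h2 : pvVal arr (k : Int) = arr[k] := by
    unfold pvVal
    rw [PySem.List.pyGetD_eq_getElem arr 0 (by omega) (by omega)]
    exact pvGetElem_congr arr (by omega) (by omega) hk
  rw [h1, h2]
  by_cases hcnd : pvVal arr j = arr[k]
  · rw [if_pos hcnd, if_pos hcnd]; ring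
  · rw [if_neg hcnd, if_neg hcnd]; ring

theorem pvB_length (arr : List Int) : (getDistanceMetrics_alt arr).length = arr.length := by
  unfold getDistanceMetrics_alt
  simp [pvDistPass_length, PySem.List.length_enumerate]

theorem pvB_getD (arr : List Int) (k : Nat) (hk : k < arr.length) :
    (getDistanceMetrics_alt arr).getD k 0 = pvSumTo arr 0 k + pvSumFrom arr k ((k : Int) + 1) := by
  unfold getDistanceMetrics_alt
  have hl : (pvDistPass (PySem.List.enumerate arr)).length = arr.length := by
    rw [pvDistPass_length, PySem.List.length_enumerate]
  have hr : ((pvDistPass ((PySem.List.enumerate arr).reverse)).reverse).length = arr.length := by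
    rw [List.length_reverse, pvDistPass_length, List.length_reverse, PySem.List.length_enumerate]
  have hzip : k < ((pvDistPass (PySem.List.enumerate arr)).zip
      ((pvDistPass ((PySem.List.enumerate arr).reverse)).reverse)).length := by
    rw [List.length_zip, hl, hr]; omega
  have hmap : k < (((pvDistPass (PySem.List.enumerate arr)).zip
      ((pvDistPass ((PySem.List.enumerate arr).reverse)).reverse)).map (fun q => q.1 - q.2)).length := by
    rw [List.length_map]; exact hzip
  rw [List.getD_eq_getElem _ _ hmap, List.getElem_map, List.getElem_zip]
  rw [← List.getD_eq_getElem _ 0 (by rw [hl]; exact hk), ← List.getD_eq_getElem _ 0 (by rw [hr]; exact hk)]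
  rw [pvLeft_getD arr k hk, pvRight_getD arr k hk]
  ring

-- ===== VERDICT (by name: the statement is the Claim_ definition above) =====
theorem getDistanceMetrics_spec : Claim_equal_getDistanceMetrics := by
  intro arr _
  show getDistanceMetrics arr = getDistanceMetrics_alt arr
  apply List.ext_getElem (by rw [pvA_length, pvB_length])
  intro i h1 h2
  have hi : i < arr.length := by rw [← pvA_length arr]; exact h1
  rw [← List.getD_eq_getElem _ 0 h1, ← List.getD_eq_getElem _ 0 h2,
      pvA_getD arr i hi, pvB_getD arr i hi]
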